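-- pv_equiv track=rewrite | github.com/c-box/LANKA | context_based/context_utils.py | mask_obj_as_whole
-- ===== SOURCE A (Python) =====
-- def mask_obj_as_whole(context, obj, mask_token, all_mask=False):
--     context = context.split(" ")
--     if all_mask is False:
--         flag = False
--         for i in range(len(context)-1, -1, -1):
--             token = context[i]
--             if obj in token:
--                 context[i] = mask_token
--                 flag = True
--                 break
--     else:
--         for i in range(len(context)-1, -1, -1):
--             token = context[i]
--             if obj in token:
--                 context[i] = mask_token
--     return " ".join(context)
-- ===== SOURCE B (Python) =====
-- def mask_obj_as_whole(context, obj, mask_token, all_mask=False):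
--     tokens = context.split(" ")
--     idxs = [i for i, t in enumerate(tokens) if obj in t]
--     if all_mask:
--         for i in idxs:
--             tokens[i] = mask_token
--     elif idxs:
--         tokens[idxs[-1]] = mask_token
--     return " ".join(tokens)
-- ===== Notes on version B (the rewrite author's own statement) =====
-- stated objective: alternative
-- what changed: Replaces A's early-terminating reverse index scan (and its flag/break control flow) by a find-then-apply decomposition: one forward pass builds the list of matching token indices, which both branches then reuse (mask all of them, or only the last one).
import Mathlib
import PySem

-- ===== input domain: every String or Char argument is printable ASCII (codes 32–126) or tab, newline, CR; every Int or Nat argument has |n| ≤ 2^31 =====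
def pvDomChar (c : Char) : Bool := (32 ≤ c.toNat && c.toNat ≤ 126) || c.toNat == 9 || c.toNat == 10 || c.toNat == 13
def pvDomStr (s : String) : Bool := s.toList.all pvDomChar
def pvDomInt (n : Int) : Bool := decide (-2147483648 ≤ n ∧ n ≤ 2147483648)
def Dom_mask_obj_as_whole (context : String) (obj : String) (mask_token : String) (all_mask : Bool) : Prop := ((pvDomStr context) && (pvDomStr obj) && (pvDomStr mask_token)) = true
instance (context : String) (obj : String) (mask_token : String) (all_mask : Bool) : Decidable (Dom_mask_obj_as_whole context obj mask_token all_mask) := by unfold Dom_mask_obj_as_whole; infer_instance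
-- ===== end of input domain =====

-- B differs from A by a find-then-apply decomposition (one forward pass collecting matching
-- indices, reused by both branches) instead of A's reverse scan with break; equal return values.

-- ===== PORT A =====
-- for i in range(len(context)-1, -1, -1): ... break  — descending index loop, fuel k means index k-1;
-- the 'break' is ported as returning from the loop (the 'flag' variable only records the break and is unused after).
def maskFindLoop (obj mask : String) (ctx : List String) : Nat → List String
  | 0 => ctx
  | k+1 =>
    let token := ctx.getD k ""   -- index always in range in the loop
    if PySem.Str.isIn obj token then ctx.set k mask
    else maskFindLoop obj mask ctx k

-- the all_mask=True loop: same descending walk, no break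
def maskAllLoop (obj mask : String) (ctx : List String) : Nat → List String
  | 0 => ctx
  | k+1 =>
    let token := ctx.getD k ""
    let ctx' := if PySem.Str.isIn obj token then ctx.set k mask else ctx
    maskAllLoop obj mask ctx' k

def mask_obj_as_whole (context : String) (obj : String) (mask_token : String) (all_mask : Bool) : String :=
  let ctx : List String := (PySem.Str.split? context " ").getD []   -- sep " " is non-empty, split? is some
  let ctx := if all_mask = false then maskFindLoop obj mask_token ctx ctx.length
             else maskAllLoop obj mask_token ctx ctx.length
  PySem.Str.join " " ctx

-- ===== PORT B =====
def mask_obj_as_whole_alt (context : String) (obj : String) (mask_token : String) (all_mask : Bool) : String :=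
  let tokens : List String := (PySem.Str.split? context " ").getD []
  let idxs := ((tokens.zipIdx).filter (fun p => PySem.Str.isIn obj p.1)).map (fun p => p.2)
  let tokens :=
    if all_mask then idxs.foldl (fun c i => c.set i mask_token) tokens
    else match idxs.getLast? with
      | some i => tokens.set i mask_token
      | none => tokens
  PySem.Str.join " " tokens

-- ===== PRECONDITION & SPEC =====
def Spec_mask_obj_as_whole (context : String) (obj : String) (mask_token : String) (all_mask : Bool) (out : String) : Prop := out = mask_obj_as_whole_alt context obj mask_token all_mask
instance (context : String) (obj : String) (mask_token : String) (all_mask : Bool) (out : String) : Decidable (Spec_mask_obj_as_whole context obj mask_token all_mask out) := by unfold Spec_mask_obj_as_whole; infer_instance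

-- ===== CLAIM (what is proved, stated in full; the proofs are below) =====
def Claim_equal_mask_obj_as_whole : Prop := ∀ (context : String) (obj : String) (mask_token : String) (all_mask : Bool), Dom_mask_obj_as_whole context obj mask_token all_mask → Spec_mask_obj_as_whole context obj mask_token all_mask (mask_obj_as_whole context obj mask_token all_mask)

-- ===== LEMMAS AND PROOFS =====

-- last matching index of a token list under predicate p, indices starting at n (proof-side helper)
def lmAux (p : String → Bool) : List String → Nat → Option Nat
  | [], _ => none
  | t :: ts, n => match lmAux p ts (n+1) with
    | some i => some i
    | none => if p t then some n else none

theorem getLast?_filter_zipIdx (p : String → Bool) (ts : List String) (n : Nat) :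
    (((ts.zipIdx n).filter (fun q => p q.1)).map (fun q => q.2)).getLast?
      = lmAux p ts n := by
  induction ts generalizing n with
  | nil => simp [lmAux]
  | cons t ts ih =>
    have ih' := ih (n+1)
    simp only [List.zipIdx_cons, List.filter_cons, lmAux]
    cases h : p t with
    | true =>
      simp only [reduceIte, List.map_cons, List.getLast?_cons, ih']
      cases hl : lmAux p ts (n+1) <;> simp
    | false =>
      simp only [Bool.false_eq_true, reduceIte, ih']
      cases hl : lmAux p ts (n+1) <;> simp

theorem lmAux_append_singleton (p : String → Bool) (ts : List String) (t : String) (n : Nat) :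
    lmAux p (ts ++ [t]) n
      = if p t then some (n + ts.length) else lmAux p ts n := by
  induction ts generalizing n with
  | nil => cases h : p t <;> simp [lmAux, h]
  | cons s ts ih =>
    simp only [List.cons_append, lmAux, ih (n+1)]
    cases h : p t with
    | true =>
      simp only [reduceIte, List.length_cons]
      have : n + 1 + ts.length = n + (ts.length + 1) := by omega
      rw [this]
    | false => simp only [Bool.false_eq_true, reduceIte]

theorem maskFindLoop_eq (obj mask : String) (ctx : List String) (k : Nat) (hk : k ≤ ctx.length) :
    maskFindLoop obj mask ctx k
      = match lmAux (fun t => PySem.Str.isIn obj t) (ctx.take k) 0 with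
        | some i => ctx.set i mask
        | none => ctx := by
  induction k with
  | zero => simp [maskFindLoop, lmAux]
  | succ k ih =>
    have hkl : k < ctx.length := by omega
    have htake : ctx.take (k+1) = ctx.take k ++ [ctx[k]] := by
      rw [List.take_add_one]; simp [List.getElem?_eq_getElem hkl]
    have hget : ctx.getD k "" = ctx[k] := List.getD_eq_getElem ctx "" hkl
    rw [maskFindLoop]
    simp only [hget]
    rw [htake, lmAux_append_singleton]
    have hlen : (ctx.take k).length = k := by simp [Nat.min_eq_left (le_of_lt hkl)]
    cases h : PySem.Str.isIn obj ctx[k] with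
    | true => simp only [reduceIte, hlen, Nat.zero_add]
    | false =>
      simp only [Bool.false_eq_true, reduceIte]
      exact ih (le_of_lt hkl)

theorem maskAllLoop_eq (obj mask : String) (ctx : List String) (k : Nat) (hk : k ≤ ctx.length) :
    maskAllLoop obj mask ctx k
      = (ctx.take k).map (fun t => if PySem.Str.isIn obj t then mask else t) ++ ctx.drop k := by
  induction k generalizing ctx with
  | zero => simp [maskAllLoop]
  | succ k ih =>
    have hkl : k < ctx.length := by omega
    have hget : ctx.getD k "" = ctx[k] := List.getD_eq_getElem ctx "" hkl
    have hdrop : ctx.drop k = ctx[k] :: ctx.drop (k+1) := List.drop_eq_getElem_cons hkl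
    have htake : ctx.take (k+1) = ctx.take k ++ [ctx[k]] := by
      rw [List.take_add_one]; simp [List.getElem?_eq_getElem hkl]
    rw [maskAllLoop]
    simp only [hget]
    cases h : PySem.Str.isIn obj ctx[k] with
    | true =>
      simp only [reduceIte]
      rw [ih (ctx.set k mask) (by simp; omega)]
      have h1 : (ctx.set k mask).take k = ctx.take k := by
        rw [List.take_set, List.set_eq_of_length_le (by simp [Nat.min_eq_left (le_of_lt hkl)])]
      have h2 : (ctx.set k mask).drop k = mask :: ctx.drop (k+1) := by
        rw [List.drop_set, if_neg (by omega)]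
        simp only [Nat.sub_self]
        rw [hdrop]; rfl
      rw [h1, h2, htake, List.map_append]
      simp only [List.map_cons, List.map_nil, h, reduceIte, List.append_assoc, List.singleton_append]
    | false =>
      simp only [Bool.false_eq_true, reduceIte]
      rw [ih ctx (le_of_lt hkl), htake, List.map_append, hdrop]
      simp only [List.map_cons, List.map_nil, h, Bool.false_eq_true, reduceIte,
        List.append_assoc, List.singleton_append]

theorem foldl_set_filter_zipIdx (obj mask : String) (ts pre : List String) :
    (((ts.zipIdx pre.length).filter (fun q => PySem.Str.isIn obj q.1)).map (fun q => q.2)).foldl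
        (fun c i => c.set i mask) (pre ++ ts)
      = pre ++ ts.map (fun t => if PySem.Str.isIn obj t then mask else t) := by
  induction ts generalizing pre with
  | nil => simp
  | cons t ts ih =>
    simp only [List.zipIdx_cons, List.filter_cons]
    cases h : PySem.Str.isIn obj t with
    | true =>
      simp only [h, reduceIte, List.map_cons, List.foldl_cons]
      have hset : (pre ++ t :: ts).set pre.length mask = (pre ++ [mask]) ++ ts := by
        rw [List.set_append_right _ _ (le_refl _)]
        simp
      rw [hset]
      have := ih (pre ++ [mask])
      simp only [List.length_append, List.length_cons, List.length_nil] at this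
      rw [this]
      simp only [List.append_assoc, List.singleton_append]
    | false =>
      simp only [Bool.false_eq_true, reduceIte]
      have := ih (pre ++ [t])
      simp only [List.length_append, List.length_cons, List.length_nil, List.append_assoc,
        List.singleton_append] at this
      rw [this]
      simp only [List.map_cons, h, Bool.false_eq_true, reduceIte]

-- ===== VERDICT (by name: the statement is the Claim_ definition above) =====
theorem mask_obj_as_whole_spec : Claim_equal_mask_obj_as_whole := by
  intro context obj mask_token all_mask _
  unfold Spec_mask_obj_as_whole mask_obj_as_whole mask_obj_as_whole_alt
  set ctx : List String := (PySem.Str.split? context " ").getD []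
  cases all_mask with
  | false =>
    simp only [reduceIte]
    rw [maskFindLoop_eq obj mask_token ctx ctx.length (le_refl _)]
    rw [List.take_length]
    have : (ctx.zipIdx) = ctx.zipIdx 0 := rfl
    rw [this, getLast?_filter_zipIdx (fun t => PySem.Str.isIn obj t)]
    cases lmAux (fun t => PySem.Str.isIn obj t) ctx 0 <;> rfl
  | true =>
    simp only [reduceIte]
    rw [if_neg (by decide)]
    rw [maskAllLoop_eq obj mask_token ctx ctx.length (le_refl _)]
    have := foldl_set_filter_zipIdx obj mask_token ctx []
    simp only [List.nil_append, List.length_nil] at this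
    rw [List.take_length, List.drop_length, List.append_nil, this]
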